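-- pv_equiv track=rewrite | github.com/christian-miljkovic/interview | CompanyChallenges/company_mb/similar_words.py | list_to_len_map
-- ===== SOURCE A (Python) =====
-- def list_to_len_map(query_list):
--
--     hash_map = dict()
--
--     for phrase in query_list:
--         phrase_split = phrase.split()
--         if len(phrase_split) not in hash_map:
--             hash_map[len(phrase_split)] = [phrase_split]
--         else:
--             hash_map[len(phrase_split)].append(phrase_split)
--
--     return hash_map
-- ===== SOURCE B (Python) =====
-- def list_to_len_map(query_list):
--     splits = [phrase.split() for phrase in query_list]
--     keys = dict.fromkeys(len(s) for s in splits)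
--     return {k: [s for s in splits if len(s) == k] for k in keys}
-- ===== Notes on version B (the rewrite author's own statement) =====
-- stated objective: alternative
-- what changed: Instead of one loop that mutates a dict entry per phrase, B splits all phrases once, computes the distinct word-counts in first-occurrence order with dict.fromkeys, and builds each group in one filtering comprehension per key.
import Mathlib
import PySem

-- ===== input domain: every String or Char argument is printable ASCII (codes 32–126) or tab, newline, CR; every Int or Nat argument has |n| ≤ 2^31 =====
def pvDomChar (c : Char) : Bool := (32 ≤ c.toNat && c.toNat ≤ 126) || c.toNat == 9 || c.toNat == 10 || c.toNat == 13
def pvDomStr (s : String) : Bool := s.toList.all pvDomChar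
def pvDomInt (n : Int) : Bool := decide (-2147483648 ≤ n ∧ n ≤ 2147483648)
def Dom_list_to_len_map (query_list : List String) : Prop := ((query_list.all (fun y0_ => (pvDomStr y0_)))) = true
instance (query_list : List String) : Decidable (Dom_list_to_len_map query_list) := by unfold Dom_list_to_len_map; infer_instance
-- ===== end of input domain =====

-- B replaces A's incremental dict mutation by splitting everything once, deduplicating the
-- word-counts (dict.fromkeys) and building each group with one filter per key: alternative decomposition.

-- ===== PORT A =====
def list_to_len_map (query_list : List String) : List (Int × List (List String)) :=
  (query_list.foldl
    (fun hash_map phrase =>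
      let phrase_split := PySem.Str.split₀ phrase
      if !(hash_map.contains ((phrase_split.length : Int))) then
        hash_map.insert ((phrase_split.length : Int)) [phrase_split]
      else
        hash_map.modify ((phrase_split.length : Int)) [] (· ++ [phrase_split]))
    PySem.Dict.empty).items

-- ===== PORT B =====
def list_to_len_map_alt (query_list : List String) : List (Int × List (List String)) :=
  let splits := query_list.map PySem.Str.split₀
  let keys := PySem.List.dedup (splits.map (fun s => ((s.length : Int))))
  keys.map (fun k => (k, splits.filter (fun s => ((s.length : Int)) == k)))

-- ===== PRECONDITION & SPEC =====
def Spec_list_to_len_map (query_list : List String) (out : List (Int × List (List String))) : Prop := out = list_to_len_map_alt query_list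
instance (query_list : List String) (out : List (Int × List (List String))) : Decidable (Spec_list_to_len_map query_list out) := by unfold Spec_list_to_len_map; infer_instance

-- ===== CLAIM (what is proved, stated in full; the proofs are below) =====
def Claim_equal_list_to_len_map : Prop := ∀ (query_list : List String), Dom_list_to_len_map query_list → Spec_list_to_len_map query_list (list_to_len_map query_list)

-- ===== LEMMAS AND PROOFS =====

-- A's if/else step is exactly Python's d[k] = d.get(k, []) + [ps], i.e. Dict.modify.
lemma step_eq_modify (d : PySem.Dict Int (List (List String))) (ps : List String) :
    (if !(d.contains ((ps.length : Int))) then d.insert ((ps.length : Int)) [ps]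
     else d.modify ((ps.length : Int)) [] (· ++ [ps]))
    = d.modify ((ps.length : Int)) [] (· ++ [ps]) := by
  by_cases h : d.contains ((ps.length : Int))
  · simp [h]
  · simp only [Bool.not_eq_true] at h
    simp [h, PySem.Dict.modify, PySem.Dict.getD_of_not_contains _ _ h]

-- ===== VERDICT (by name: the statement is the Claim_ definition above) =====
theorem list_to_len_map_spec : Claim_equal_list_to_len_map := by
  intro ql _
  unfold Spec_list_to_len_map list_to_len_map list_to_len_map_alt
  have hf : (fun (hm : PySem.Dict Int (List (List String))) (phrase : String) =>
      let phrase_split := PySem.Str.split₀ phrase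
      if !(hm.contains ((phrase_split.length : Int))) then
        hm.insert ((phrase_split.length : Int)) [phrase_split]
      else
        hm.modify ((phrase_split.length : Int)) [] (· ++ [phrase_split]))
    = fun (hm : PySem.Dict Int (List (List String))) (phrase : String) =>
        hm.modify ((((fun p => (((PySem.Str.split₀ p).length : Int), PySem.Str.split₀ p)) phrase).1)) []
          (· ++ [((fun p => (((PySem.Str.split₀ p).length : Int), PySem.Str.split₀ p)) phrase).2]) := by
    funext hm phrase
    exact step_eq_modify hm (PySem.Str.split₀ phrase)
  rw [hf, ← List.foldl_map (f := fun p => (((PySem.Str.split₀ p).length : Int), PySem.Str.split₀ p))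
        (g := fun (d : PySem.Dict Int (List (List String))) (p : Int × List String) => d.modify p.1 [] (· ++ [p.2]))]
  have hnd : ((List.map (fun p => (((PySem.Str.split₀ p).length : Int), PySem.Str.split₀ p)) ql).foldl
      (fun (d : PySem.Dict Int (List (List String))) p => d.modify p.1 [] (· ++ [p.2])) PySem.Dict.empty).keys.Nodup :=
    PySem.Dict.nodup_keys_foldl_modify_key _ (fun (p : Int × List String) => p.1) []
      (fun _ (p : Int × List String) => (· ++ [p.2])) _ PySem.Dict.nodup_keys_empty
  rw [PySem.Dict.items_eq_map_keys _ hnd []]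
  rw [PySem.Dict.keys_foldl_modify_key _ (fun (p : Int × List String) => p.1) []
      (fun _ (p : Int × List String) => (· ++ [p.2]))]
  simp only [PySem.Dict.getD_foldl_modify_append, PySem.Dict.getD_empty, PySem.Dict.keys_empty,
    PySem.Set.update_nil_left, PySem.List.dedup_eq_ofList, List.map_map, List.filter_map,
    List.nil_append]
  simp [Function.comp_def]
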